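-- pv_equiv track=rewrite | github.com/umairalipathan1980/AI-Report-Writing-Full-Stack | fullstack-app/backend/app/agents/revision_agent.py | _reconstruct_report
-- ===== SOURCE A (Python) =====
-- from typing import Dict, Any, Optional, List, Tuple
--
-- def _reconstruct_report(sections: Dict[str, str]) -> str:
--     """
--     Reconstruct the complete report from individual sections.
--
--     Args:
--         sections: Dictionary of section name -> content
--
--     Returns:
--         str: Complete reconstructed report
--     """
--
--     # Define the expected section order
--     expected_order = [
--         'Company Info',
--         'AI Maturity Level',
--         'Current Solution Development Stage',
--         'Validity of Concept and Authenticity of Problem Addressed',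
--         'Integration and Importance of AI in the Idea',
--         'Identified Target Market and Customer Segments',
--         'Data Requirement Assessment',
--         'Data Collection Strategy',
--         'Technical Expertise and Capability',
--         'Expectations from FAIR Services',
--         'Recommendations',
--         'AI Maturity Levels'
--     ]
--
--     reconstructed_parts = []
--
--     # Add sections in the expected order
--     for section_name in expected_order:
--         if section_name in sections:
--             content = sections[section_name].strip()
--             if content:
--                 reconstructed_parts.append(content)
--
--     # Add any remaining sections not in the expected order
--     for section_name, content in sections.items():
--         if section_name not in expected_order:
--             content = content.strip()
--             if content:
--                 reconstructed_parts.append(content)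
--
--     return '\n\n'.join(reconstructed_parts)
-- ===== SOURCE B (Python) =====
-- def _reconstruct_report(sections):
--     """Reconstruct the report by bucketing sections in one pass (counting-sort by
--     expected position) instead of scanning the dict once per expected name."""
--     expected_order = [
--         'Company Info',
--         'AI Maturity Level',
--         'Current Solution Development Stage',
--         'Validity of Concept and Authenticity of Problem Addressed',
--         'Integration and Importance of AI in the Idea',
--         'Identified Target Market and Customer Segments',
--         'Data Requirement Assessment',
--         'Data Collection Strategy',
--         'Technical Expertise and Capability',
--         'Expectations from FAIR Services',
--         'Recommendations',
--         'AI Maturity Levels',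
--     ]
--     pos = {name: i for i, name in enumerate(expected_order)}
--     buckets = [[] for _ in range(len(expected_order) + 1)]
--     for name, content in sections.items():
--         stripped = content.strip()
--         if stripped:
--             buckets[pos.get(name, len(expected_order))].append(stripped)
--     return '\n\n'.join(part for bucket in buckets for part in bucket)
-- ===== Notes on version B (the rewrite author's own statement) =====
-- stated objective: alternative
-- what changed: Replaces A's two passes (one dict probe per expected name, then a per-item list-membership rescan) with a prebuilt position index and a single bucketing pass (counting sort by expected position) whose buckets are concatenated; Pre_ excludes association lists with duplicate keys, which cannot arise from a Python dict and whose first-match/items order is accidental at the port level.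
import Mathlib
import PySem

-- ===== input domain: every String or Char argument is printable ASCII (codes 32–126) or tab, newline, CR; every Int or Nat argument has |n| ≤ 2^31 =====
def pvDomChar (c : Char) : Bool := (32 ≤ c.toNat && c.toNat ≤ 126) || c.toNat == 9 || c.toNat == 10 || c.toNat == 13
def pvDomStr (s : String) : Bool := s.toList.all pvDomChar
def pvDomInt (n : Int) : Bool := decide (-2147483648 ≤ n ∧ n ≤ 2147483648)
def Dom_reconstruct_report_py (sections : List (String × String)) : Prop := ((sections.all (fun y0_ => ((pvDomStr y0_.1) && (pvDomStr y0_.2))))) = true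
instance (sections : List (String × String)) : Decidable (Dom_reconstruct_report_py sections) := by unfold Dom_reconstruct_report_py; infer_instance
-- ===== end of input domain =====

-- B buckets the sections in one pass by a precomputed position index (counting sort)
-- instead of A's expected-name scan plus per-item list-membership rescan.
-- The 'sections' dict is the association list of its items; equivalence is about the return value (neither mutates).

def pvExpectedOrder : List String :=
  ["Company Info",
   "AI Maturity Level",
   "Current Solution Development Stage",
   "Validity of Concept and Authenticity of Problem Addressed",
   "Integration and Importance of AI in the Idea",
   "Identified Target Market and Customer Segments",
   "Data Requirement Assessment",
   "Data Collection Strategy",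
   "Technical Expertise and Capability",
   "Expectations from FAIR Services",
   "Recommendations",
   "AI Maturity Levels"]

-- ===== PORT A =====
def reconstruct_report_py (sections : List (String × String)) : String :=
  let expected_order := pvExpectedOrder
  let parts1 := expected_order.foldl (fun acc name =>
    match (PySem.Dict.mk sections).get? name with   -- 'if section_name in sections' + 'sections[section_name]'
    | some content =>
        let c := PySem.Str.strip content
        if c = "" then acc else acc ++ [c]
    | none => acc) []
  let parts := sections.foldl (fun acc nc =>
    if expected_order.contains nc.1 then acc
    else
      let c := PySem.Str.strip nc.2
      if c = "" then acc else acc ++ [c]) parts1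
  PySem.Str.join "\n\n" parts

-- ===== PORT B =====
def reconstruct_report_py_alt (sections : List (String × String)) : String :=
  let expected_order := pvExpectedOrder
  let pos := (PySem.List.enumerate expected_order).foldl
    (fun d p => d.insert p.2 p.1) (PySem.Dict.empty : PySem.Dict String Int)
  let buckets0 : List (List String) := List.replicate (expected_order.length + 1) []
  let buckets := sections.foldl (fun bs nc =>
    let stripped := PySem.Str.strip nc.2
    if stripped = "" then bs
    else
      let k := pos.getD nc.1 (expected_order.length : Int)
      PySem.List.pySetD bs k (PySem.List.pyGetD bs k [] ++ [stripped])) buckets0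
  PySem.Str.join "\n\n" buckets.flatten

-- ===== PRECONDITION & SPEC =====
-- Pre_ excludes association lists with duplicate keys: they cannot arise from a Python
-- dict (the input type), and on them the first-match lookup vs items-iteration behaviour
-- of the two ports is an artefact of the encoding, not of either Python program.
def Pre_reconstruct_report_py (sections : List (String × String)) : Prop :=
  (sections.map Prod.fst).Nodup
instance (sections : List (String × String)) : Decidable (Pre_reconstruct_report_py sections) := by
  unfold Pre_reconstruct_report_py; infer_instance

def pvWitness_reconstruct_report_py : (List (String × String)) :=
  [("Recommendations", "  buy more GPUs "), ("Extra Notes", "appendix"), ("Company Info", "")]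

def Spec_reconstruct_report_py (sections : List (String × String)) (out : String) : Prop := out = reconstruct_report_py_alt sections
instance (sections : List (String × String)) (out : String) : Decidable (Spec_reconstruct_report_py sections out) := by unfold Spec_reconstruct_report_py; infer_instance

-- ===== CLAIM (what is proved, stated in full; the proofs are below) =====
def Claim_equal_reconstruct_report_py : Prop := ∀ (sections : List (String × String)), Dom_reconstruct_report_py sections → Pre_reconstruct_report_py sections → Spec_reconstruct_report_py sections (reconstruct_report_py sections)

-- ===== LEMMAS AND PROOFS =====

-- what A's first loop contributes for one expected name
def pvG (sections : List (String × String)) (name : String) : List String :=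
  match (PySem.Dict.mk sections).get? name with
  | some content => if PySem.Str.strip content = "" then [] else [PySem.Str.strip content]
  | none => []

-- the sections landing in bucket k, in input order, stripped
def pvPart (sections : List (String × String)) (k : Nat) : List String :=
  (sections.filter (fun nc => List.idxOf nc.1 pvExpectedOrder == k && !(PySem.Str.strip nc.2 == ""))).map
    (fun nc => PySem.Str.strip nc.2)

lemma pvEO_nodup : pvExpectedOrder.Nodup := by decide

lemma pvPos_getD (E : List String) (hE : E.Nodup) (s : Int) (d : PySem.Dict String Int)
    (dflt : Int) (n : String) :
    ((PySem.List.enumerate E s).foldl (fun d p => d.insert p.2 p.1) d).getD n dflt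
      = if n ∈ E then s + (List.idxOf n E : Int) else d.getD n dflt := by
  induction E generalizing s d with
  | nil => simp [PySem.List.enumerate]
  | cons e E ih =>
    rw [PySem.List.enumerate_cons, List.foldl_cons]
    rw [ih hE.of_cons (s+1) (d.insert e s)]
    by_cases hmem : n ∈ E
    · have hne : n ≠ e := by
        intro h; subst h
        exact (List.nodup_cons.mp hE).1 hmem
      simp only [hmem, if_true, List.mem_cons, hne, or_true, if_true]
      rw [List.idxOf_cons]
      have : (e == n) = false := by simp [Ne.symm hne]
      rw [this]
      simp only [cond_false]
      push_cast
      ring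
    · simp only [hmem, if_false, PySem.Dict.getD_insert, List.mem_cons, or_false]
      by_cases he : n = e
      · subst he
        simp [List.idxOf_cons]
      · simp [he]

lemma pvKey (n : String) :
    ((PySem.List.enumerate pvExpectedOrder).foldl (fun d p => d.insert p.2 p.1)
        (PySem.Dict.empty : PySem.Dict String Int)).getD n (12 : Int)
      = (List.idxOf n pvExpectedOrder : Int) := by
  rw [pvPos_getD pvExpectedOrder pvEO_nodup 0 _ 12 n]
  by_cases hmem : n ∈ pvExpectedOrder
  · simp [hmem]
  · have h12 : List.idxOf n pvExpectedOrder = 12 := List.idxOf_eq_length hmem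
    rw [if_neg hmem, PySem.Dict.getD_empty, h12]
    norm_num

lemma pvKey_le (n : String) : List.idxOf n pvExpectedOrder ≤ 12 := by
  have := List.idxOf_le_length (a := n) (l := pvExpectedOrder)
  simpa [pvExpectedOrder] using this

lemma pvSetD_natCast {α : Type} (xs : List α) (n : Nat) (v : α) (h : n < xs.length) :
    PySem.List.pySetD xs (↑n) v = xs.set n v := by
  have h1 : ((n:Int) < (xs.length:Int)) := by exact_mod_cast h
  simp [PySem.List.pySetD, PySem.List.pySet?, PySem.List.pyIdx?, h1]

lemma pvBucketFold (l : List (String × String)) (bs : List (List String)) (hbs : bs.length = 13) :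
    ((l.foldl (fun bs nc =>
        let stripped := PySem.Str.strip nc.2
        if stripped = "" then bs
        else
          let k := ((PySem.List.enumerate pvExpectedOrder).foldl (fun d p => d.insert p.2 p.1)
              (PySem.Dict.empty : PySem.Dict String Int)).getD nc.1 (12 : Int)
          PySem.List.pySetD bs k (PySem.List.pyGetD bs k [] ++ [stripped])) bs).length = 13)
    ∧ ∀ k, k < 13 →
      (l.foldl (fun bs nc =>
        let stripped := PySem.Str.strip nc.2
        if stripped = "" then bs
        else
          let k := ((PySem.List.enumerate pvExpectedOrder).foldl (fun d p => d.insert p.2 p.1)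
              (PySem.Dict.empty : PySem.Dict String Int)).getD nc.1 (12 : Int)
          PySem.List.pySetD bs k (PySem.List.pyGetD bs k [] ++ [stripped])) bs).getD k []
        = bs.getD k [] ++ pvPart l k := by
  induction l generalizing bs with
  | nil => exact ⟨hbs, by intro k _; simp [pvPart]⟩
  | cons nc l ih =>
    simp only [List.foldl_cons]
    by_cases h : PySem.Str.strip nc.2 = ""
    · simp only [h, if_pos rfl, if_true]
      refine ⟨(ih bs hbs).1, fun k hk => ?_⟩
      rw [(ih bs hbs).2 k hk]
      simp [pvPart, List.filter_cons, h]
    · simp only [h, if_neg, if_false]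
      set m : Nat := List.idxOf nc.1 pvExpectedOrder with hm
      have hmlt : m < bs.length := by rw [hbs]; exact Nat.lt_succ_of_le (pvKey_le nc.1)
      have hkey : ((PySem.List.enumerate pvExpectedOrder).foldl (fun d p => d.insert p.2 p.1)
              (PySem.Dict.empty : PySem.Dict String Int)).getD nc.1 (12 : Int) = (m : Int) := pvKey nc.1
      rw [hkey, pvSetD_natCast _ _ _ hmlt, PySem.List.pyGetD_natCast]
      set bs' := bs.set m (bs.getD m [] ++ [PySem.Str.strip nc.2]) with hbs'
      have hlen' : bs'.length = 13 := by rw [hbs', List.length_set, hbs]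
      refine ⟨(ih bs' hlen').1, fun k hk => ?_⟩
      rw [(ih bs' hlen').2 k hk]
      have hget : bs'.getD k [] = if m = k then bs.getD m [] ++ [PySem.Str.strip nc.2] else bs.getD k [] := by
        rw [hbs']
        simp only [List.getD, List.getElem?_set, hmlt, if_pos]
        by_cases hkm : m = k
        · simp [hkm]
        · simp [hkm]
      rw [hget]
      have hpart : pvPart (nc :: l) k = (if m = k then [PySem.Str.strip nc.2] else []) ++ pvPart l k := by
        simp only [pvPart, List.filter_cons, ← hm, h]
        by_cases hkm : m = k
        · simp [hkm, h]
        · simp [hkm, h]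
      rw [hpart]
      by_cases hkm : m = k
      · simp [hkm, List.append_assoc]
      · simp [hkm]

lemma pvB_eq (sections : List (String × String)) :
    reconstruct_report_py_alt sections
      = PySem.Str.join "\n\n" ((List.range 13).flatMap (pvPart sections)) := by
  show PySem.Str.join "\n\n" (List.flatten (sections.foldl (fun bs nc =>
        let stripped := PySem.Str.strip nc.2
        if stripped = "" then bs
        else
          let k := ((PySem.List.enumerate pvExpectedOrder).foldl (fun d p => d.insert p.2 p.1)
              (PySem.Dict.empty : PySem.Dict String Int)).getD nc.1 (12 : Int)
          PySem.List.pySetD bs k (PySem.List.pyGetD bs k [] ++ [stripped]))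
        (List.replicate 13 ([] : List String)))) = _
  obtain ⟨hlen, hget⟩ := pvBucketFold sections (List.replicate 13 ([] : List String)) (by simp)
  have hfold : (sections.foldl (fun bs nc =>
        let stripped := PySem.Str.strip nc.2
        if stripped = "" then bs
        else
          let k := ((PySem.List.enumerate pvExpectedOrder).foldl (fun d p => d.insert p.2 p.1)
              (PySem.Dict.empty : PySem.Dict String Int)).getD nc.1 (12 : Int)
          PySem.List.pySetD bs k (PySem.List.pyGetD bs k [] ++ [stripped]))
        (List.replicate 13 ([] : List String)))
      = (List.range 13).map (pvPart sections) := by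
    apply List.ext_getElem?
    intro i
    by_cases hi : i < 13
    · rw [List.getElem?_eq_getElem (by rw [hlen]; exact hi),
        List.getElem?_map, List.getElem?_range hi]
      have := hget i hi
      rw [List.getD_eq_getElem _ _ (by rw [hlen]; exact hi)] at this
      have hrep : (List.replicate 13 ([]:List String)).getD i [] = [] := by
        interval_cases i <;> rfl
      rw [this, hrep]
      simp
    · rw [List.getElem?_eq_none (by omega), List.getElem?_eq_none (by simp; omega)]
  rw [hfold, ← List.flatMap_def]

lemma pvFold1 (l : List String) (sections : List (String × String)) (acc : List String) :
    (l.foldl (fun acc name =>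
      match (PySem.Dict.mk sections).get? name with
      | some content =>
          let c := PySem.Str.strip content
          if c = "" then acc else acc ++ [c]
      | none => acc) acc) = acc ++ l.flatMap (pvG sections) := by
  induction l generalizing acc with
  | nil => simp
  | cons x l ih =>
    rw [List.foldl_cons, List.flatMap_cons, ih]
    cases h : (PySem.Dict.mk sections).get? x with
    | none => simp [pvG, h]
    | some content =>
      by_cases hc : PySem.Str.strip content = ""
      · simp [pvG, h, hc]
      · simp [pvG, h, hc]

lemma pvFold2 (l : List (String × String)) (acc : List String) :
    (l.foldl (fun acc nc =>
      if pvExpectedOrder.contains nc.1 then acc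
      else
        let c := PySem.Str.strip nc.2
        if c = "" then acc else acc ++ [c]) acc)
      = acc ++ (l.filter (fun nc => !pvExpectedOrder.contains nc.1 && !(PySem.Str.strip nc.2 == ""))).map
          (fun nc => PySem.Str.strip nc.2) := by
  induction l generalizing acc with
  | nil => simp
  | cons nc l ih =>
    rw [List.foldl_cons, List.filter_cons, ih]
    by_cases h1 : nc.1 ∈ pvExpectedOrder
    · simp [h1]
    · by_cases h2 : PySem.Str.strip nc.2 = ""
      · simp [h1, h2]
      · simp [h1, h2]

lemma pvFilterKey (sections : List (String × String)) (hnd : (sections.map Prod.fst).Nodup) (n : String) :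
    ((sections.filter (fun nc => nc.1 == n && !(PySem.Str.strip nc.2 == ""))).map
      (fun nc => PySem.Str.strip nc.2)) = pvG sections n := by
  induction sections with
  | nil => simp [pvG, PySem.Dict.get?]
  | cons mc rest ih =>
    have hnd' : (mc.1 :: rest.map Prod.fst).Nodup := by simpa using hnd
    obtain ⟨hnotin, hrest⟩ := List.nodup_cons.mp hnd'
    by_cases hm : mc.1 = n
    · have hget : (PySem.Dict.mk (mc :: rest)).get? n = some mc.2 := by
        rw [PySem.Dict.get?_mk_cons]; simp [hm]
      have hfr : rest.filter (fun nc => nc.1 == n && !(PySem.Str.strip nc.2 == "")) = [] := by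
        apply List.filter_eq_nil_iff.mpr
        intro nc hnc
        have hne : nc.1 ≠ n := by
          intro he
          exact hnotin (by rw [hm, ← he]; exact List.mem_map_of_mem hnc)
        simp [hne]
      by_cases hc : PySem.Str.strip mc.2 = ""
      · simp [pvG, hget, List.filter_cons, hm, hc, hfr]
      · simp [pvG, hget, List.filter_cons, hm, hc, hfr]
    · have hget : (PySem.Dict.mk (mc :: rest)).get? n = (PySem.Dict.mk rest).get? n := by
        rw [PySem.Dict.get?_mk_cons]; simp [hm]
      have hpg : pvG (mc :: rest) n = pvG rest n := by
        simp only [pvG, hget]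
      rw [hpg, ← ih hrest, List.filter_cons]
      simp [hm]

lemma pvG_eq_part (sections : List (String × String)) (hnd : (sections.map Prod.fst).Nodup)
    (i : Nat) (n : String) (h : pvExpectedOrder[i]? = some n) :
    pvG sections n = pvPart sections i := by
  obtain ⟨hi, hn⟩ := List.getElem?_eq_some_iff.mp h
  have hpred : ∀ nc : String × String,
      (List.idxOf nc.1 pvExpectedOrder == i && !(PySem.Str.strip nc.2 == ""))
        = (nc.1 == n && !(PySem.Str.strip nc.2 == "")) := by
    intro nc
    congr 1
    by_cases he : nc.1 = n
    · subst he
      have : List.idxOf nc.1 pvExpectedOrder = i := by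
        rw [← hn]
        exact pvEO_nodup.idxOf_getElem i hi
      simp [this]
    · have : List.idxOf nc.1 pvExpectedOrder ≠ i := by
        intro hidx
        have hlt : List.idxOf nc.1 pvExpectedOrder < pvExpectedOrder.length := by omega
        have h3 : pvExpectedOrder[List.idxOf nc.1 pvExpectedOrder]? = some nc.1 := by
          rw [List.getElem?_eq_getElem hlt, List.getElem_idxOf hlt]
        rw [hidx, h] at h3
        exact he (by injection h3 with h4; exact h4.symm)
      simp [this, he]
  unfold pvPart
  rw [List.filter_congr (fun nc _ => hpred nc)]
  exact (pvFilterKey sections hnd n).symm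

lemma pvRest_eq_part (sections : List (String × String)) :
    ((sections.filter (fun nc => !pvExpectedOrder.contains nc.1 && !(PySem.Str.strip nc.2 == ""))).map
      (fun nc => PySem.Str.strip nc.2)) = pvPart sections 12 := by
  unfold pvPart
  congr 1
  apply List.filter_congr
  intro nc _
  congr 1
  by_cases hmem : nc.1 ∈ pvExpectedOrder
  · have h1 : pvExpectedOrder.contains nc.1 = true := List.contains_iff_mem.mpr hmem
    have h2 : List.idxOf nc.1 pvExpectedOrder < 12 := by
      have := List.idxOf_lt_length_iff.mpr hmem
      simpa [pvExpectedOrder] using this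
    simp [hmem, beq_iff_eq, Nat.ne_of_lt h2]
  · have h1 : pvExpectedOrder.contains nc.1 = false := by
      simp [List.contains_iff_mem, hmem]
    have h2 : List.idxOf nc.1 pvExpectedOrder = 12 := by
      have := List.idxOf_eq_length hmem
      simpa [pvExpectedOrder] using this
    simp [hmem, h2]
    rfl

lemma pvA_eq (sections : List (String × String)) (hnd : (sections.map Prod.fst).Nodup) :
    reconstruct_report_py sections
      = PySem.Str.join "\n\n" ((List.range 13).flatMap (pvPart sections)) := by
  show PySem.Str.join "\n\n" (sections.foldl (fun acc nc =>
      if pvExpectedOrder.contains nc.1 then acc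
      else
        let c := PySem.Str.strip nc.2
        if c = "" then acc else acc ++ [c])
      (pvExpectedOrder.foldl (fun acc name =>
        match (PySem.Dict.mk sections).get? name with
        | some content =>
            let c := PySem.Str.strip content
            if c = "" then acc else acc ++ [c]
        | none => acc) [])) = _
  rw [pvFold1 pvExpectedOrder sections [], pvFold2, pvRest_eq_part, List.nil_append]
  have hsplit : (List.range 13).flatMap (pvPart sections)
      = (List.range 12).flatMap (pvPart sections) ++ pvPart sections 12 := by
    rw [List.range_succ, List.flatMap_append]
    simp
  have hr : List.range 12 = [0,1,2,3,4,5,6,7,8,9,10,11] := by rfl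
  have hEO : pvExpectedOrder.flatMap (pvG sections) = (List.range 12).flatMap (pvPart sections) := by
    rw [hr]
    simp only [pvExpectedOrder, List.flatMap_cons, List.flatMap_nil, List.append_nil]
    rw [pvG_eq_part sections hnd 0 "Company Info" (by rfl),
      pvG_eq_part sections hnd 1 "AI Maturity Level" (by rfl),
      pvG_eq_part sections hnd 2 "Current Solution Development Stage" (by rfl),
      pvG_eq_part sections hnd 3 "Validity of Concept and Authenticity of Problem Addressed" (by rfl),
      pvG_eq_part sections hnd 4 "Integration and Importance of AI in the Idea" (by rfl),
      pvG_eq_part sections hnd 5 "Identified Target Market and Customer Segments" (by rfl),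
      pvG_eq_part sections hnd 6 "Data Requirement Assessment" (by rfl),
      pvG_eq_part sections hnd 7 "Data Collection Strategy" (by rfl),
      pvG_eq_part sections hnd 8 "Technical Expertise and Capability" (by rfl),
      pvG_eq_part sections hnd 9 "Expectations from FAIR Services" (by rfl),
      pvG_eq_part sections hnd 10 "Recommendations" (by rfl),
      pvG_eq_part sections hnd 11 "AI Maturity Levels" (by rfl)]
  rw [hsplit, hEO]

-- ===== VERDICT (by name: the statement is the Claim_ definition above) =====
theorem reconstruct_report_py_spec : Claim_equal_reconstruct_report_py := by
  intro sections _ hpre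
  unfold Spec_reconstruct_report_py
  rw [pvA_eq sections hpre, pvB_eq sections]
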